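-- pv_equiv track=rewrite | github.com/johnluo92/python_workspace | Algoexpert/Binary Search Tree/Min Height BST.py | minHeightArray
-- ===== SOURCE A (Python) =====
-- def minHeightArray(array, newarray):
--     if len(array) == 0:
--         return array
--     else:
--         mid = (len(array) // 2)
--         newarray.append(array[mid])
--         minHeightArray(array[:mid],newarray)
--
--     minHeightArray(array[mid+1:],newarray)
--     return newarray
-- ===== SOURCE B (Python) =====
-- def minHeightArray(array, newarray):
--     if len(array) == 0:
--         return array
--     stack = [(0, len(array))]
--     while stack:
--         lo, hi = stack.pop()
--         if lo >= hi:
--             continue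
--         mid = lo + (hi - lo) // 2
--         newarray.append(array[mid])
--         stack.append((mid + 1, hi))
--         stack.append((lo, mid))
--     return newarray
-- ===== Notes on version B (the rewrite author's own statement) =====
-- stated objective: alternative
-- what changed: Replaced A's recursion over slice copies with an iterative preorder traversal using an explicit stack of (lo,hi) index ranges, so no sublists are ever materialised.
import Mathlib
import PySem

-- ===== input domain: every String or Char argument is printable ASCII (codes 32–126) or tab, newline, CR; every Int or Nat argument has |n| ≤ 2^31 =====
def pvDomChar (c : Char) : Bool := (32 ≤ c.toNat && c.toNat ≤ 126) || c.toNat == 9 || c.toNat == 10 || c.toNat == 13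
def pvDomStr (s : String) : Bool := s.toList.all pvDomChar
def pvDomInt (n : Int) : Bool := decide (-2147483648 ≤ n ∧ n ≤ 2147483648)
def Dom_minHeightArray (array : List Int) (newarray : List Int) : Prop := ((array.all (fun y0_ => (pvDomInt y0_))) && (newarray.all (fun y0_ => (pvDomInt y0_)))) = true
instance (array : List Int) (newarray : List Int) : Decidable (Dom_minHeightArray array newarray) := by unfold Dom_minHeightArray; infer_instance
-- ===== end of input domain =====

-- B replaces A's recursion over slice copies with an iterative explicit-stack preorder
-- traversal over index ranges (alternative decomposition; no sublist copies).
-- Both A and B mutate `newarray` in place in Python; the equivalence proved here is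
-- about the RETURN value (the mutation effect of both is the same appends).


-- ===== PORT A =====
-- Python A calls itself recursively FOR ITS MUTATION EFFECT on `newarray`: when the
-- slice is empty the call returns the empty slice but leaves `newarray` unchanged,
-- otherwise it returns the mutated `newarray`.  The `if … = 0 then nk else …` guards
-- below transcribe exactly that mutation effect.  `fuel` only bounds the recursion
-- depth (it never runs out for the initial value `array.length + 1` supplied below).
def pvRunA (fuel : Nat) (array : List Int) (newarray : List Int) : List Int :=
  match fuel with
  | 0 => array          -- unreachable for the initial fuel
  | fuel + 1 =>
    if array.length = 0 then array
    else
      let mid : Nat := array.length / 2                               -- len(array) // 2 (nonnegative)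
      let n1 := newarray ++ [PySem.List.pyGetD array (mid : Int) 0]   -- newarray.append(array[mid]); mid < len, in range
      let left := PySem.List.slice array none (some (mid : Int))      -- array[:mid]
      let n2 := if left.length = 0 then n1 else pvRunA fuel left n1
      let right := PySem.List.slice array (some ((mid : Int) + 1)) none   -- array[mid+1:]
      if right.length = 0 then n2 else pvRunA fuel right n2

def minHeightArray (array : List Int) (newarray : List Int) : List Int :=
  pvRunA (array.length + 1) array newarray

-- ===== PORT B =====
-- the while-loop of Source B: list head = top of the Python stack; `fuel` only bounds the
-- number of iterations (never exhausted for the initial value 2*len+1 supplied below)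
def pvAltLoop (array : List Int) (fuel : Nat) (stack : List (Nat × Nat)) (acc : List Int) : List Int :=
  match fuel, stack with
  | 0, _ => acc
  | _ + 1, [] => acc
  | fuel + 1, (lo, hi) :: rest =>
    if lo ≥ hi then pvAltLoop array fuel rest acc
    else
      let mid := lo + (hi - lo) / 2
      pvAltLoop array fuel ((lo, mid) :: (mid + 1, hi) :: rest)
        (acc ++ [PySem.List.pyGetD array (mid : Int) 0])    -- newarray.append(array[mid])

def minHeightArray_alt (array : List Int) (newarray : List Int) : List Int :=
  if array.length = 0 then array
  else pvAltLoop array (2 * array.length + 1) [(0, array.length)] newarray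

-- ===== PRECONDITION & SPEC =====
def Spec_minHeightArray (array : List Int) (newarray : List Int) (out : List Int) : Prop := out = minHeightArray_alt array newarray
instance (array : List Int) (newarray : List Int) (out : List Int) : Decidable (Spec_minHeightArray array newarray out) := by unfold Spec_minHeightArray; infer_instance

-- ===== CLAIM (what is proved, stated in full; the proofs are below) =====
def Claim_equal_minHeightArray : Prop := ∀ (array : List Int) (newarray : List Int), Dom_minHeightArray array newarray → Spec_minHeightArray array newarray (minHeightArray array newarray)

-- ===== LEMMAS AND PROOFS =====

-- the common preorder sequence of the min-height-BST of `a`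
def pvPre (a : List Int) : List Int :=
  if a.length = 0 then []
  else a.getD (a.length / 2) 0 ::
        (pvPre (a.take (a.length / 2)) ++ pvPre (a.drop (a.length / 2 + 1)))
termination_by a.length
decreasing_by
  · simp [List.length_take]; omega
  · simp [List.length_drop]; omega

theorem pvPre_nil : pvPre [] = [] := by rw [pvPre]; rfl

theorem pvPre_of_len_zero (a : List Int) (h : a.length = 0) : pvPre a = [] := by
  rw [pvPre]; simp [h]

-- characterisation of A
theorem A_char : ∀ (fuel : Nat) (a new : List Int), a.length < fuel →
    pvRunA fuel a new = if a.length = 0 then a else new ++ pvPre a := by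
  intro fuel
  induction fuel with
  | zero => intro a new h; omega
  | succ n ih =>
    intro a new h
    by_cases h0 : a.length = 0
    · simp [pvRunA, h0]
    · have hcast : ((a.length / 2 : Nat) : Int) + 1 = (((a.length / 2 + 1 : Nat)) : Int) := by
        push_cast; ring
      simp only [pvRunA, h0, if_false, PySem.List.slice_to_natCast, hcast,
        PySem.List.slice_from_natCast, PySem.List.pyGetD_natCast]
      have hmid : a.length / 2 < a.length := by omega
      have hlt : (a.take (a.length / 2)).length < n := by simp [List.length_take]; omega
      have hrt : (a.drop (a.length / 2 + 1)).length < n := by simp [List.length_drop]; omega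
      have hL : (if (a.take (a.length / 2)).length = 0 then new ++ [a.getD (a.length / 2) 0]
            else pvRunA n (a.take (a.length / 2)) (new ++ [a.getD (a.length / 2) 0]))
          = (new ++ [a.getD (a.length / 2) 0]) ++ pvPre (a.take (a.length / 2)) := by
        by_cases hc : (a.take (a.length / 2)).length = 0
        · rw [if_pos hc, pvPre_of_len_zero _ hc, List.append_nil]
        · rw [if_neg hc, ih _ _ hlt, if_neg hc]
      rw [hL]
      set m := (new ++ [a.getD (a.length / 2) 0]) ++ pvPre (a.take (a.length / 2)) with hm
      have hR : (if (a.drop (a.length / 2 + 1)).length = 0 then m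
            else pvRunA n (a.drop (a.length / 2 + 1)) m)
          = m ++ pvPre (a.drop (a.length / 2 + 1)) := by
        by_cases hc : (a.drop (a.length / 2 + 1)).length = 0
        · rw [if_pos hc, pvPre_of_len_zero _ hc, List.append_nil]
        · rw [if_neg hc, ih _ _ hrt, if_neg hc]
      rw [hR, hm]
      conv_rhs => rw [pvPre]
      simp [h0]

-- splitting pvPre of an index segment of `a`
theorem pvPre_seg (a : List Int) (lo hi : Nat) (hlh : lo < hi) (hha : hi ≤ a.length) :
    pvPre ((a.drop lo).take (hi - lo)) =
      a.getD (lo + (hi - lo) / 2) 0 ::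
        (pvPre ((a.drop lo).take ((hi - lo) / 2)) ++
         pvPre ((a.drop (lo + (hi - lo) / 2 + 1)).take (hi - (lo + (hi - lo) / 2 + 1)))) := by
  have hslen : ((a.drop lo).take (hi - lo)).length = hi - lo := by
    simp [List.length_take, List.length_drop]; omega
  have hm : (hi - lo) / 2 < hi - lo := by omega
  have hhead : ((a.drop lo).take (hi - lo)).getD (((a.drop lo).take (hi - lo)).length / 2) 0
      = a.getD (lo + (hi - lo) / 2) 0 := by
    rw [hslen, List.getD_eq_getElem _ _ (by rw [hslen]; omega),
        List.getD_eq_getElem _ _ (by omega)]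
    simp [List.getElem_take, List.getElem_drop]
  have hleft : ((a.drop lo).take (hi - lo)).take (((a.drop lo).take (hi - lo)).length / 2)
      = (a.drop lo).take ((hi - lo) / 2) := by
    rw [hslen, List.take_take]; congr 1; omega
  have hright : ((a.drop lo).take (hi - lo)).drop (((a.drop lo).take (hi - lo)).length / 2 + 1)
      = (a.drop (lo + (hi - lo) / 2 + 1)).take (hi - (lo + (hi - lo) / 2 + 1)) := by
    rw [hslen, List.drop_take, List.drop_drop]; congr 1; omega
  conv_lhs => rw [pvPre]
  rw [if_neg (by omega), hhead, hleft, hright]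

-- loop invariant of B's stack loop
theorem loop_char : ∀ (fuel : Nat) (a : List Int) (stack : List (Nat × Nat)) (acc : List Int),
    2 * (stack.map (fun p => p.2 - p.1)).sum + stack.length ≤ fuel →
    (∀ p ∈ stack, p.2 ≤ a.length) →
    pvAltLoop a fuel stack acc =
      acc ++ (stack.map (fun p => pvPre ((a.drop p.1).take (p.2 - p.1)))).flatten := by
  intro fuel
  induction fuel with
  | zero =>
    intro a stack acc hn hinv
    match stack with
    | [] => simp [pvAltLoop]
    | p :: rest => simp at hn
  | succ n ih =>
    intro a stack acc hn hinv
    match stack with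
    | [] => simp [pvAltLoop]
    | (lo, hi) :: rest =>
      rw [pvAltLoop]
      simp only [List.map_cons, List.sum_cons, List.length_cons] at hn
      by_cases hge : lo ≥ hi
      · simp only [hge, if_true]
        rw [ih a rest acc (by omega) (fun p hp => hinv p (by simp [hp]))]
        have hsub : hi - lo = 0 := by omega
        simp [hsub, pvPre_nil]
      · simp only [hge, if_false]
        have hlh : lo < hi := by omega
        have hha : hi ≤ a.length := hinv (lo, hi) (by simp)
        have hmeas : 2 * ((((lo, lo + (hi - lo) / 2) :: (lo + (hi - lo) / 2 + 1, hi) :: rest).map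
              (fun p => p.2 - p.1)).sum)
            + ((lo, lo + (hi - lo) / 2) :: (lo + (hi - lo) / 2 + 1, hi) :: rest).length ≤ n := by
          simp only [List.map_cons, List.sum_cons, List.length_cons]; omega
        have hinv' : ∀ p ∈ (lo, lo + (hi - lo) / 2) :: (lo + (hi - lo) / 2 + 1, hi) :: rest,
            p.2 ≤ a.length := by
          intro p hp
          simp only [List.mem_cons] at hp
          rcases hp with rfl | rfl | hmem
          · show lo + (hi - lo) / 2 ≤ a.length; omega
          · exact hha
          · exact hinv p (by simp [hmem])
        rw [ih a _ _ hmeas hinv']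
        rw [PySem.List.pyGetD_natCast]
        simp only [List.map_cons, List.flatten_cons, List.append_assoc]
        rw [pvPre_seg a lo hi hlh hha]
        simp

-- ===== VERDICT (by name: the statement is the Claim_ definition above) =====
theorem minHeightArray_spec : Claim_equal_minHeightArray := by
  intro array newarray _
  unfold Spec_minHeightArray minHeightArray minHeightArray_alt
  rw [A_char (array.length + 1) array newarray (by omega)]
  by_cases h0 : array.length = 0
  · simp [h0]
  · simp only [h0, if_false]
    rw [loop_char (2 * array.length + 1) array [(0, array.length)] newarray
      (by simp) (by simp)]
    simp
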